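-- pv_equiv track=rewrite | github.com/gabrielpmcardoso/atividade-1-programa-o-funcional | ex2.py | classificador
-- ===== SOURCE A (Python) =====
-- def classificador(fila):
--     emergencia = []
--     urgencia = []
--     normal = []
--     for paciente in fila:
--         if paciente[1] == 'E':
--             emergencia.append(paciente)
--         elif paciente[1] == 'U':
--             urgencia.append(paciente)
--         else:
--             normal.append(paciente)
--     return emergencia + urgencia + normal
-- ===== SOURCE B (Python) =====
-- def classificador(fila):
--     return sorted(fila, key=lambda p: {'E': 0, 'U': 1}.get(p[1], 2))
-- ===== Notes on version B (the rewrite author's own statement) =====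
-- stated objective: idiomatic
-- what changed: Replaces the three-bucket loop and concatenation with a single stable sorted() call whose key maps 'E' to 0, 'U' to 1 and anything else to 2.
import Mathlib
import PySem

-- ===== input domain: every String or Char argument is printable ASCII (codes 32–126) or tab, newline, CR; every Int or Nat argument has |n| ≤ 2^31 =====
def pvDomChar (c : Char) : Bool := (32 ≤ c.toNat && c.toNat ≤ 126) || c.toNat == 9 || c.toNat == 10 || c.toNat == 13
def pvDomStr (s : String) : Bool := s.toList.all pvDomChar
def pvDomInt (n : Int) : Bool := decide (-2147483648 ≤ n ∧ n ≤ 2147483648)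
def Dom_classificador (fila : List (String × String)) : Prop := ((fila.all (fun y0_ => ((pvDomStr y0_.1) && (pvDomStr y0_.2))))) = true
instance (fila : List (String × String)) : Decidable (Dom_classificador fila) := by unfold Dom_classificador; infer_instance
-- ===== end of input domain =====

-- ===== PORT A =====
-- One honest line: B replaces A's three-bucket loop by a single stable sort with key E->0, U->1, other->2 (idiomatic; same return value).
-- A: one pass distributing each patient into one of three buckets, then concatenation.
def classificador (fila : List (String × String)) : List (String × String) :=
  let s := fila.foldl
    (fun (acc : List (String × String) × List (String × String) × List (String × String)) paciente =>
      if paciente.2 == "E" then (acc.1 ++ [paciente], acc.2.1, acc.2.2)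
      else if paciente.2 == "U" then (acc.1, acc.2.1 ++ [paciente], acc.2.2)
      else (acc.1, acc.2.1, acc.2.2 ++ [paciente]))
    ([], [], [])
  s.1 ++ s.2.1 ++ s.2.2

-- ===== PORT B =====
-- B: one stable sort by the key {'E': 0, 'U': 1}.get(p[1], 2).
def classificador_alt (fila : List (String × String)) : List (String × String) :=
  PySem.List.sorted fila
    (fun p => PySem.Dict.getD (PySem.Dict.ofList [("E", (0 : Int)), ("U", 1)]) p.2 2) false

-- ===== PRECONDITION & SPEC =====
def Spec_classificador (fila : List (String × String)) (out : List (String × String)) : Prop := out = classificador_alt fila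
instance (fila : List (String × String)) (out : List (String × String)) : Decidable (Spec_classificador fila out) := by unfold Spec_classificador; infer_instance

-- ===== CLAIM (what is proved, stated in full; the proofs are below) =====
def Claim_equal_classificador : Prop := ∀ (fila : List (String × String)), Dom_classificador fila → Spec_classificador fila (classificador fila)

-- ===== LEMMAS AND PROOFS =====

-- B's sort key, written out as the if-chain it computes.
def pvKey (p : String × String) : Int :=
  if p.2 == "E" then 0 else if p.2 == "U" then 1 else 2

-- A's loop body, named for the proofs.
def pvStep (acc : List (String × String) × List (String × String) × List (String × String))
    (paciente : String × String) :
    List (String × String) × List (String × String) × List (String × String) :=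
  if paciente.2 == "E" then (acc.1 ++ [paciente], acc.2.1, acc.2.2)
  else if paciente.2 == "U" then (acc.1, acc.2.1 ++ [paciente], acc.2.2)
  else (acc.1, acc.2.1, acc.2.2 ++ [paciente])

lemma pvKey_eq (p : String × String) :
    PySem.Dict.getD (PySem.Dict.ofList [("E", (0 : Int)), ("U", 1)]) p.2 2 = pvKey p := by
  rcases p with ⟨a, b⟩
  by_cases hE : b = "E"
  · subst hE; simp [pvKey]; rfl
  · by_cases hU : b = "U"
    · subst hU; simp [pvKey]; rfl
    · have h1 : ("E" == b) = false := beq_eq_false_iff_ne.mpr (fun h => hE h.symm)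
      have h2 : ("U" == b) = false := beq_eq_false_iff_ne.mpr (fun h => hU h.symm)
      simp [PySem.Dict.getD, PySem.Dict.get?, PySem.Dict.ofList, PySem.Dict.update,
            PySem.Dict.insert, PySem.Dict.empty, List.find?, h1, h2,
            pvKey, hE, hU]

lemma insertBy_append_of_forall_not {α : Type} (before : α → α → Bool) (x : α)
    (l1 l2 : List α) (h : ∀ y ∈ l1, before x y = false) :
    PySem.List.insertBy before x (l1 ++ l2) = l1 ++ PySem.List.insertBy before x l2 := by
  induction l1 with
  | nil => simp
  | cons a t ih =>
    have ha : before x a = false := h a (by simp)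
    simp [PySem.List.insertBy, ha]
    exact ih (fun y hy => h y (by simp [hy]))

lemma insertBy_of_forall_before {α : Type} (before : α → α → Bool) (x : α)
    (l : List α) (h : ∀ y ∈ l, before x y = true) :
    PySem.List.insertBy before x l = x :: l := by
  cases l with
  | nil => simp [PySem.List.insertBy]
  | cons a t => simp [PySem.List.insertBy, h a (by simp)]

-- Invariant: folding insertBy over the rest, starting from e ++ u ++ n with keys 0/1/2,
-- equals running A's bucket loop from (e, u, n) and concatenating.
lemma pv_loop (fila : List (String × String)) :
    ∀ (e u n : List (String × String)),
      (∀ q ∈ e, pvKey q = 0) → (∀ q ∈ u, pvKey q = 1) → (∀ q ∈ n, pvKey q = 2) →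
      fila.foldl (fun acc x =>
          PySem.List.insertBy (fun a b => decide (pvKey a < pvKey b)) x acc) (e ++ u ++ n) =
      (fila.foldl pvStep (e, u, n)).1 ++ (fila.foldl pvStep (e, u, n)).2.1 ++
        (fila.foldl pvStep (e, u, n)).2.2 := by
  induction fila with
  | nil => intro e u n _ _ _; simp
  | cons p rest ih =>
    intro e u n he hu hn
    by_cases hE : p.2 == "E"
    · have hk : pvKey p = 0 := by simp [pvKey, hE]
      have hins : PySem.List.insertBy (fun a b => decide (pvKey a < pvKey b)) p (e ++ u ++ n)
          = (e ++ [p]) ++ u ++ n := by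
        rw [List.append_assoc]
        rw [insertBy_append_of_forall_not _ _ e (u ++ n)
              (fun y hy => by simp [hk, he y hy])]
        rw [insertBy_of_forall_before _ _ (u ++ n)
              (fun y hy => by
                rcases List.mem_append.mp hy with h1 | h1
                · simp [hk, hu y h1]
                · simp [hk, hn y h1])]
        simp
      simp only [List.foldl_cons, hins]
      simp only [pvStep, hE, if_pos]
      exact ih (e ++ [p]) u n
        (fun q hq => by
          rcases List.mem_append.mp hq with h1 | h1
          · exact he q h1
          · simp at h1; simp [h1, hk])
        hu hn
    · by_cases hU : p.2 == "U"
      · have hk : pvKey p = 1 := by simp [pvKey, hE, hU]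
        have hins : PySem.List.insertBy (fun a b => decide (pvKey a < pvKey b)) p (e ++ u ++ n)
            = e ++ (u ++ [p]) ++ n := by
          rw [insertBy_append_of_forall_not _ _ (e ++ u) n
                (fun y hy => by
                  rcases List.mem_append.mp hy with h1 | h1
                  · simp [hk, he y h1]
                  · simp [hk, hu y h1])]
          rw [insertBy_of_forall_before _ _ n (fun y hy => by simp [hk, hn y hy])]
          simp [List.append_assoc]
        simp only [List.foldl_cons, hins, pvStep, hE, hU, if_neg, if_pos, Bool.false_eq_true,
          not_false_iff]
        exact ih e (u ++ [p]) n he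
          (fun q hq => by
            rcases List.mem_append.mp hq with h1 | h1
            · exact hu q h1
            · simp at h1; simp [h1, hk])
          hn
      · have hk : pvKey p = 2 := by simp [pvKey, hE, hU]
        have hins : PySem.List.insertBy (fun a b => decide (pvKey a < pvKey b)) p (e ++ u ++ n)
            = e ++ u ++ (n ++ [p]) := by
          rw [PySem.List.insertBy_of_forall_not_before _ _ _
                (fun y hy => by
                  rcases List.mem_append.mp hy with h1 | h1
                  · rcases List.mem_append.mp h1 with h2 | h2
                    · simp [hk, he y h2]
                    · simp [hk, hu y h2]
                  · simp [hk, hn y h1])]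
          simp [List.append_assoc]
        simp only [List.foldl_cons, hins, pvStep, hE, hU, if_neg, Bool.false_eq_true,
          not_false_iff]
        exact ih e u (n ++ [p]) he hu
          (fun q hq => by
            rcases List.mem_append.mp hq with h1 | h1
            · exact hn q h1
            · simp at h1; simp [h1, hk])

-- ===== VERDICT (by name: the statement is the Claim_ definition above) =====
theorem classificador_spec : Claim_equal_classificador := by
  intro fila _
  unfold Spec_classificador classificador classificador_alt
  have hkey : (fun p : String × String =>
      PySem.Dict.getD (PySem.Dict.ofList [("E", (0 : Int)), ("U", 1)]) p.2 2) = pvKey :=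
    funext pvKey_eq
  rw [hkey, PySem.List.sorted_eq_foldl_insertBy]
  exact (pv_loop fila [] [] [] (by simp) (by simp) (by simp)).symm
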